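-- pv_equiv track=rewrite | github.com/jrached/6.009 | lab5/lab.py | check_nd_neighbors
-- ===== SOURCE A (Python) =====
-- def check_nd_neighbors(tup, dimensions):
--     """
--     returns a list containing the neighbors of a square in n dimensions
--     """
--     if len(tup) == 1:
--         return [(tup[0]-1,),(tup[0],), (tup[0]+1,)]
--
--     smaller_problem = check_nd_neighbors(tup[1:], dimensions)
--
--     result = []
--     for tupple in smaller_problem:
--         for x in [tup[0]-1, tup[0], tup[0]+1]:
--             new_tup = (x,) + tupple
--             if len(new_tup) == len(tup):
--                 result.append(new_tup)
--             if len(result) == 3**len(tup):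
--                 return result
-- ===== SOURCE B (Python) =====
-- def check_nd_neighbors(tup, dimensions):
--     """Mixed-radix closed form: neighbor #i has coordinate j equal to
--     tup[j] + (i // 3**j) % 3 - 1, for i in range(3**n)."""
--     n = len(tup)
--     return [tuple(t + i // 3 ** j % 3 - 1 for j, t in enumerate(tup))
--             for i in range(3 ** n)]
-- ===== Notes on version B (the rewrite author's own statement) =====
-- stated objective: alternative
-- what changed: Replaces A's recursive prepend-and-double-loop construction (with its early-return counter) by a non-recursive mixed-radix closed form: neighbor #i is tuple(t + i//3**j % 3 - 1 for j,t in enumerate(tup)) for i in range(3**n), yielding the same tuples in the same order.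
import Mathlib
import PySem

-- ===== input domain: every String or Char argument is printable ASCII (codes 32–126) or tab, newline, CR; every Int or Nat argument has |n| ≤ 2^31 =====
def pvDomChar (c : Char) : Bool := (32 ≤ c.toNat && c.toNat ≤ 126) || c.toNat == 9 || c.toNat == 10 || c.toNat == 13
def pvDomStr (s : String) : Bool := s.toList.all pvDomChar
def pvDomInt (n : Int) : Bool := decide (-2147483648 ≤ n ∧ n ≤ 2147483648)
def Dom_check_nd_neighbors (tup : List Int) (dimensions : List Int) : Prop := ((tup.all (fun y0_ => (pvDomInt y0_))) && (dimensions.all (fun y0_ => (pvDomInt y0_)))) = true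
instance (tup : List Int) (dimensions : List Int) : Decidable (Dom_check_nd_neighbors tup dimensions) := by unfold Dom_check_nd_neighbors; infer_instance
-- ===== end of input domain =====

-- B replaces A's recursive prepend-and-loop construction by a mixed-radix closed form over
-- range(3**n) (objective: alternative algorithm, same output in the same order).

-- ===== PORT A =====
-- inner 'for x in [tup[0]-1, tup[0], tup[0]+1]' loop; Sum.inl = the early 'return result' fired
def aInner (n : Nat) (tupple : List Int) : List Int → List (List Int) → Sum (List (List Int)) (List (List Int))
  | [], result => Sum.inr result
  | x :: xs, result =>
    let new_tup := x :: tupple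
    let result' := if new_tup.length == n then result ++ [new_tup] else result
    if result'.length == 3 ^ n then Sum.inl result'
    else aInner n tupple xs result'

-- outer 'for tupple in smaller_problem' loop
def aOuter (t : Int) (n : Nat) : List (List Int) → List (List Int) → Sum (List (List Int)) (List (List Int))
  | [], result => Sum.inr result
  | tupple :: rest, result =>
    match aInner n tupple [t - 1, t, t + 1] result with
    | Sum.inl r => Sum.inl r
    | Sum.inr r => aOuter t n rest r

def check_nd_neighbors (tup : List Int) (dimensions : List Int) : List (List Int) :=
  match tup with
  | [] => []  -- Python recurses forever here (RecursionError); excluded by Pre_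
  | [t] => [[t - 1], [t], [t + 1]]
  | t :: rest =>
    let smaller := check_nd_neighbors rest dimensions
    match aOuter t (t :: rest).length smaller [] with
    | Sum.inl r => r
    | Sum.inr r => r  -- Python falls off the end (returns None); unreachable for nonempty tup

-- ===== PORT B =====
-- 3 ** j with j = enumerate index (always ≥ 0), ported exactly as 3 ^ j.toNat
def check_nd_neighbors_alt (tup : List Int) (dimensions : List Int) : List (List Int) :=
  let n := tup.length
  (PySem.List.pyRange 0 (3 ^ n : Int) 1).map (fun i =>
    (PySem.List.enumerate tup 0).map (fun jt =>
      jt.2 + PySem.Int.mod (PySem.Int.floordiv i ((3 : Int) ^ jt.1.toNat)) 3 - 1))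

-- ===== PRECONDITION & SPEC =====
-- Pre_ excludes only the empty tuple, on which Python A recurses forever (RecursionError).
def Pre_check_nd_neighbors (tup : List Int) (dimensions : List Int) : Prop := tup ≠ []
instance (tup : List Int) (dimensions : List Int) : Decidable (Pre_check_nd_neighbors tup dimensions) := by unfold Pre_check_nd_neighbors; infer_instance
def pvWitness_check_nd_neighbors : List Int × List Int := ([0, 1], [])

def Spec_check_nd_neighbors (tup : List Int) (dimensions : List Int) (out : List (List Int)) : Prop := out = check_nd_neighbors_alt tup dimensions
instance (tup : List Int) (dimensions : List Int) (out : List (List Int)) : Decidable (Spec_check_nd_neighbors tup dimensions out) := by unfold Spec_check_nd_neighbors; infer_instance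

-- ===== CLAIM (what is proved, stated in full; the proofs are below) =====
def Claim_equal_check_nd_neighbors : Prop := ∀ (tup : List Int) (dimensions : List Int), Dom_check_nd_neighbors tup dimensions → Pre_check_nd_neighbors tup dimensions → Spec_check_nd_neighbors tup dimensions (check_nd_neighbors tup dimensions)

-- ===== LEMMAS AND PROOFS =====

-- the common mathematical shape of both results
def spine : List Int → List (List Int)
  | [] => [[]]
  | t :: rest => (spine rest).flatMap (fun c => [(t - 1) :: c, t :: c, (t + 1) :: c])

lemma spine_mem_length : ∀ (l : List Int) (c : List Int), c ∈ spine l → c.length = l.length := by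
  intro l
  induction l with
  | nil => intro c hc; simp [spine] at hc; simp [hc]
  | cons t rest ih =>
    intro c hc
    simp only [spine, List.mem_flatMap] at hc
    obtain ⟨d, hd, hc⟩ := hc
    have := ih d hd
    simp at hc
    rcases hc with h | h | h <;> subst h <;> simp [this]

lemma spine_length : ∀ (l : List Int), (spine l).length = 3 ^ l.length := by
  intro l
  induction l with
  | nil => simp [spine]
  | cons t rest ih =>
    simp only [spine, List.length_flatMap, List.length_cons, pow_succ]
    simp [ih, mul_comm]

lemma aInner_char (n : Nat) (tupple : List Int) (t : Int) (r : List (List Int))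
    (hn : n = tupple.length + 1) (hle : r.length + 3 ≤ 3 ^ n) :
    aInner n tupple [t - 1, t, t + 1] r =
      (if r.length + 3 = 3 ^ n
       then Sum.inl (r ++ [(t - 1) :: tupple, t :: tupple, (t + 1) :: tupple])
       else Sum.inr (r ++ [(t - 1) :: tupple, t :: tupple, (t + 1) :: tupple])) := by
  subst hn
  simp only [aInner, List.length_cons, beq_self_eq_true, if_true, List.length_append,
    beq_iff_eq]
  split_ifs with h1 h2 h3 h4 h5 <;> try omega
  all_goals simp_all [List.append_assoc]
  all_goals omega

lemma aOuter_char (t : Int) (n : Nat) : ∀ (ss r : List (List Int)),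
    (∀ c ∈ ss, c.length + 1 = n) → r.length + 3 * ss.length = 3 ^ n → ss ≠ [] →
    aOuter t n ss r = Sum.inl (r ++ ss.flatMap (fun c => [(t - 1) :: c, t :: c, (t + 1) :: c])) := by
  intro ss
  induction ss with
  | nil => intro r _ _ h; exact absurd rfl h
  | cons c ss' ih =>
    intro r hlen hcount _
    have hn : n = c.length + 1 := (hlen c (by simp)).symm
    have hle : r.length + 3 ≤ 3 ^ n := by
      simp only [List.length_cons] at hcount; omega
    simp only [aOuter, aInner_char n c t r hn hle]
    rcases ss' with _ | ⟨c2, ss2⟩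
    · have : r.length + 3 = 3 ^ n := by simp at hcount; omega
      simp [this]
    · have hne : r.length + 3 ≠ 3 ^ n := by
        simp only [List.length_cons] at hcount; omega
      simp only [if_neg hne]
      rw [ih (r ++ [(t - 1) :: c, t :: c, (t + 1) :: c])
          (fun d hd => hlen d (by simp [hd]))
          (by simp only [List.length_append, List.length_cons, List.length_nil] at hcount ⊢; omega)
          (by simp)]
      simp [List.flatMap_cons, List.append_assoc]

lemma A_eq : ∀ (tup dimensions : List Int), tup ≠ [] →
    check_nd_neighbors tup dimensions = spine tup := by
  intro tup
  induction tup with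
  | nil => intro d h; exact absurd rfl h
  | cons t rest ih =>
    intro d _
    rcases rest with _ | ⟨r, rs⟩
    · simp [check_nd_neighbors, spine]
    · rw [show check_nd_neighbors (t :: r :: rs) d =
          (match aOuter t (t :: r :: rs).length (check_nd_neighbors (r :: rs) d) [] with
           | Sum.inl res => res
           | Sum.inr res => res) from rfl]
      rw [ih d (by simp)]
      rw [aOuter_char t (t :: r :: rs).length (spine (r :: rs)) []
          (fun c hc => by rw [spine_mem_length _ c hc]; rfl)
          (by rw [spine_length]; simp [pow_succ, mul_comm])
          (by intro h; have hl := spine_length (r :: rs); rw [h] at hl; simp only [List.length_nil] at hl; exact (pow_ne_zero _ (by norm_num)) hl.symm)]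
      simp [spine]

lemma fdiv_shift (q r : Int) (k : Nat) (hr0 : 0 ≤ r) (hr : r < 3) :
    PySem.Int.floordiv (3 * q + r) ((3 : Int) ^ (k + 1)) = PySem.Int.floordiv q ((3 : Int) ^ k) := by
  have hk : (0 : Int) < 3 ^ k := by positivity
  have hk1 : (0 : Int) < 3 ^ (k + 1) := by positivity
  set q' := PySem.Int.floordiv q ((3 : Int) ^ k) with hq'
  have h := (PySem.Int.floordiv_eq_iff_of_pos hk).mp hq'.symm
  refine (PySem.Int.floordiv_eq_iff_of_pos hk1).mpr ⟨?_, ?_⟩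
  · have : q' * 3 ^ k ≤ q := h.1
    calc q' * (3 : Int) ^ (k + 1) = 3 * (q' * 3 ^ k) := by ring
    _ ≤ 3 * q := by linarith
    _ ≤ 3 * q + r := by linarith
  · have : q < (q' + 1) * 3 ^ k := h.2
    calc 3 * q + r < 3 * (q + 1) := by linarith
    _ ≤ 3 * ((q' + 1) * 3 ^ k) := by linarith
    _ = (q' + 1) * 3 ^ (k + 1) := by ring

lemma enum_shift : ∀ (l : List Int) (s : Int), 0 ≤ s → ∀ (q r : Int), 0 ≤ r → r < 3 →
    (PySem.List.enumerate l (s + 1)).map (fun jt =>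
        jt.2 + PySem.Int.mod (PySem.Int.floordiv (3 * q + r) ((3 : Int) ^ jt.1.toNat)) 3 - 1)
    = (PySem.List.enumerate l s).map (fun jt =>
        jt.2 + PySem.Int.mod (PySem.Int.floordiv q ((3 : Int) ^ jt.1.toNat)) 3 - 1) := by
  intro l
  induction l with
  | nil => intro s _ q r _ _; simp [PySem.List.enumerate_nil]
  | cons x xs ih =>
    intro s hs q r hr0 hr
    rw [PySem.List.enumerate_cons, PySem.List.enumerate_cons]
    simp only [List.map_cons]
    have hts : (s + 1).toNat = s.toNat + 1 := by omega
    rw [hts, fdiv_shift q r s.toNat hr0 hr]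
    rw [ih (s + 1) (by omega) q r hr0 hr]

def decodeFn (tup : List Int) (i : Int) : List Int :=
  (PySem.List.enumerate tup 0).map (fun jt =>
    jt.2 + PySem.Int.mod (PySem.Int.floordiv i ((3 : Int) ^ jt.1.toNat)) 3 - 1)

lemma decode_cons (t : Int) (rest : List Int) (q r : Int) (hr0 : 0 ≤ r) (hr : r < 3) :
    decodeFn (t :: rest) (3 * q + r) = (t + r - 1) :: decodeFn rest q := by
  unfold decodeFn
  rw [PySem.List.enumerate_cons]
  simp only [List.map_cons, List.cons.injEq]
  refine ⟨?_, ?_⟩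
  · have h1 : PySem.Int.floordiv (3 * q + r) ((3 : Int) ^ (0 : Int).toNat) = 3 * q + r := by
      rw [show ((3 : Int) ^ (0 : Int).toNat) = 1 from by norm_num,
        PySem.Int.floordiv_eq_ediv_of_pos (by norm_num)]
      simp
    rw [h1, PySem.Int.mod_eq_emod_of_pos (by norm_num)]
    omega
  · simpa using enum_shift rest 0 le_rfl q r hr0 hr

lemma range_split : ∀ (m : Nat),
    PySem.List.pyRange 0 (3 * (m : Int)) 1 =
      (PySem.List.pyRange 0 (m : Int) 1).flatMap (fun q => [3 * q, 3 * q + 1, 3 * q + 2]) := by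
  intro m
  induction m with
  | zero => simp [PySem.List.pyRange_one_eq_nil]
  | succ m ih =>
    have e3 : PySem.List.pyRange (3 * (m : Int)) (3 * m + 3) 1 = [3 * m, 3 * m + 1, 3 * m + 2] := by
      rw [PySem.List.pyRange_one_cons (by linarith), PySem.List.pyRange_one_cons (by linarith),
        PySem.List.pyRange_one_cons (by linarith), PySem.List.pyRange_one_eq_nil (by linarith)]
      rfl
    push_cast
    rw [show (3 : Int) * ((m : Int) + 1) = 3 * m + 3 from by ring,
      PySem.List.pyRange_one_append 0 (3 * (m : Int)) (3 * m + 3) (by positivity) (by linarith),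
      e3,
      show ((m : Int) + 1) = (m : Int) + 1 from rfl,
      PySem.List.pyRange_one_succ_right (by positivity),
      List.flatMap_append, ih]
    simp

lemma B_eq : ∀ (tup dimensions : List Int), check_nd_neighbors_alt tup dimensions = spine tup := by
  intro tup d
  have hB : check_nd_neighbors_alt tup d =
      (PySem.List.pyRange 0 ((3 : Int) ^ tup.length) 1).map (decodeFn tup) := rfl
  rw [hB]; clear hB
  induction tup with
  | nil =>
    rw [show ((3 : Int) ^ ([] : List Int).length) = 0 + 1 from by norm_num,
        PySem.List.pyRange_one_singleton]
    simp [decodeFn, PySem.List.enumerate_nil, spine]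
  | cons t rest ih =>
    have h3 : ((3 : Int) ^ (t :: rest).length) = 3 * 3 ^ rest.length := by
      simp [pow_succ, mul_comm]
    rw [h3, show ((3 : Int) ^ rest.length) = ((3 ^ rest.length : Nat) : Int) from by push_cast; ring,
        range_split, List.map_flatMap]
    have hpt : ∀ q : Int, (fun q => List.map (decodeFn (t :: rest)) [3 * q, 3 * q + 1, 3 * q + 2]) q
        = [(t - 1) :: decodeFn rest q, t :: decodeFn rest q, (t + 1) :: decodeFn rest q] := by
      intro q
      simp only [List.map_cons, List.map_nil]
      rw [decode_cons t rest q 1 (by norm_num) (by norm_num),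
          decode_cons t rest q 2 (by norm_num) (by norm_num),
          show 3 * q = 3 * q + 0 from by ring,
          decode_cons t rest q 0 le_rfl (by norm_num)]
      simp only [List.cons.injEq, and_true]
      omega
    rw [List.flatMap_congr (fun q _ => hpt q)]
    rw [show ((3 ^ rest.length : Nat) : Int) = (3 : Int) ^ rest.length from by push_cast; ring]
    rw [show (PySem.List.pyRange 0 ((3:Int) ^ rest.length) 1).flatMap
          (fun q => [(t - 1) :: decodeFn rest q, t :: decodeFn rest q, (t + 1) :: decodeFn rest q])
        = ((PySem.List.pyRange 0 ((3:Int) ^ rest.length) 1).map (decodeFn rest)).flatMap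
          (fun c => [(t - 1) :: c, t :: c, (t + 1) :: c]) from by
      rw [List.flatMap_map]]
    rw [ih]
    simp [spine]

-- ===== VERDICT (by name: the statement is the Claim_ definition above) =====
theorem check_nd_neighbors_spec : Claim_equal_check_nd_neighbors := by
  intro tup d _ hpre
  unfold Spec_check_nd_neighbors
  rw [A_eq tup d hpre, B_eq tup d]
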